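-- pv_equiv track=rewrite | github.com/C4Zamora/Ejercicios | SumaSubconjuntoLista.py | solve
-- ===== SOURCE A (Python) =====
-- def solve(lista):
--     # Variable donde voy a acumular el resultado final
--     total = 0
--
--     # Recorro todos los posibles puntos de inicio de sublistas
--     for i in range(len(lista)):
--
--         # Recorro todos los posibles puntos finales de sublistas
--         for j in range(i, len(lista)):
--
--             # Saco la sublista desde i hasta j
--             sublista = lista[i:j+1]
--
--             # Convierto la sublista a set para eliminar duplicados
--             sublista_unica = set(sublista)
--
--             # Sumo los elementos de la sublista sin repetidos
--             suma_sublista = sum(sublista_unica)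
--
--             # Agrego esa suma al total general
--             total += suma_sublista
--
--     # Retorno el resultado final
--     return total
--
-- lista = [1, 2, 1]
-- ===== SOURCE B (Python) =====
-- def solve(lista):
--     # For each start index, extend the subarray one element at a time,
--     # maintaining the set of seen values and the running distinct-sum.
--     n = len(lista)
--     total = 0
--     for i in range(n):
--         seen = set()
--         acc = 0
--         for x in lista[i:]:
--             if x not in seen:
--                 seen.add(x)
--                 acc += x
--             total += acc
--     return total
-- ===== Notes on version B (the rewrite author's own statement) =====
-- stated objective: faster
-- what changed: Instead of rebuilding each sublist with a fresh set (O(n^3)), B extends each start's subarray one element at a time, maintaining a seen-set and a running distinct-sum incrementally.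
import Mathlib
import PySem

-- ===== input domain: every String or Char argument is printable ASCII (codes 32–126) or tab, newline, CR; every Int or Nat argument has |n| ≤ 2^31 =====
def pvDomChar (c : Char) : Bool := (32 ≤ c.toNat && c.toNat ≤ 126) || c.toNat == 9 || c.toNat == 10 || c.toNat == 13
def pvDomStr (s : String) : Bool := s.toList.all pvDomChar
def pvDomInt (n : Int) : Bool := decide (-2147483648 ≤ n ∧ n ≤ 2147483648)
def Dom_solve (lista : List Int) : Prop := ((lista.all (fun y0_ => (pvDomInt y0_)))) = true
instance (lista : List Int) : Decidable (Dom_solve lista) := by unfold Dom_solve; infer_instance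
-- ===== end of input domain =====

-- B replaces A's rebuild-slice-and-set-per-(i,j) triple loop by one incremental pass per
-- start index, maintaining the seen-set and the running distinct-sum (O(n^2) vs O(n^3)).

-- ===== PORT A =====
def solve (lista : List Int) : Int :=
  (PySem.List.pyRange 0 (lista.length : Int) 1).foldl
    (fun total i =>
      (PySem.List.pyRange i (lista.length : Int) 1).foldl
        (fun total j =>
          total + (PySem.Set.ofList (PySem.List.slice lista (some i) (some (j + 1)))).sum)
        total)
    0

-- ===== PORT B =====
-- one step of B's inner loop: state = (seen, acc, total)
def bStep (st : PySem.Set Int × Int × Int) (x : Int) : PySem.Set Int × Int × Int :=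
  if x ∈ st.1 then (st.1, st.2.1, st.2.2 + st.2.1)
  else (st.1.add x, st.2.1 + x, st.2.2 + (st.2.1 + x))

def solve_alt (lista : List Int) : Int :=
  (PySem.List.pyRange 0 (lista.length : Int) 1).foldl
    (fun total i =>
      ((PySem.List.slice lista (some i) none).foldl bStep (PySem.Set.empty, 0, total)).2.2)
    0

-- ===== PRECONDITION & SPEC =====
def Spec_solve (lista : List Int) (out : Int) : Prop := out = solve_alt lista
instance (lista : List Int) (out : Int) : Decidable (Spec_solve lista out) := by unfold Spec_solve; infer_instance

-- ===== CLAIM (what is proved, stated in full; the proofs are below) =====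
def Claim_equal_solve : Prop := ∀ (lista : List Int), Dom_solve lista → Spec_solve lista (solve lista)

-- ===== LEMMAS AND PROOFS =====

lemma ofList_append_singleton (p : List Int) (x : Int) :
    PySem.Set.ofList (p ++ [x]) = (PySem.Set.ofList p).add x := by
  simp [PySem.Set.ofList_eq_foldl, List.foldl_append]

-- B's inner loop, started on the seen-set of an already-processed prefix p, adds to total
-- the distinct-sums of all extensions p ++ t.take (k+1).
lemma bLoop (t : List Int) : ∀ (p : List Int) (total : Int),
    (t.foldl bStep (PySem.Set.ofList p, (PySem.Set.ofList p).sum, total)).2.2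
      = total + ((List.range t.length).map
          (fun k => (PySem.Set.ofList (p ++ t.take (k + 1))).sum)).sum := by
  induction t with
  | nil => intro p total; simp
  | cons x t ih =>
    intro p total
    have hstep : bStep (PySem.Set.ofList p, (PySem.Set.ofList p).sum, total) x
        = (PySem.Set.ofList (p ++ [x]), (PySem.Set.ofList (p ++ [x])).sum,
           total + (PySem.Set.ofList (p ++ [x])).sum) := by
      by_cases hx : x ∈ PySem.Set.ofList p
      · simp [bStep, hx, ofList_append_singleton]
      · simp [bStep, hx, ofList_append_singleton]
    rw [List.foldl_cons, hstep, ih (p ++ [x])]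
    simp only [List.length_cons]
    rw [List.range_succ_eq_map, List.map_cons, List.map_map, List.sum_cons]
    have hmap : ∀ k : Nat,
        (PySem.Set.ofList ((p ++ [x]) ++ t.take (k + 1))).sum
          = (PySem.Set.ofList (p ++ (x :: t).take (Nat.succ k + 1))).sum := by
      intro k
      rw [List.take_succ_cons, ← List.append_cons]
    rw [List.map_congr_left (fun k _ => hmap k)]
    have : (PySem.Set.ofList (p ++ (x :: t).take (0 + 1))).sum
        = (PySem.Set.ofList (p ++ [x])).sum := by simp
    rw [← this]
    simp only [Function.comp_def, Nat.succ_eq_add_one, ← add_assoc]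

-- A's inner loop over end indices equals B's incremental pass over lista[i:].
lemma inner_eq (lista : List Int) (i : Int) (h0 : 0 ≤ i) (total : Int) :
    ((PySem.List.pyRange i (lista.length : Int) 1).foldl
        (fun tot j => tot + (PySem.Set.ofList (PySem.List.slice lista (some i) (some (j + 1)))).sum)
        total)
      = ((PySem.List.slice lista (some i) none).foldl bStep (PySem.Set.empty, 0, total)).2.2 := by
  rw [PySem.List.foldl_add, PySem.List.slice_from lista h0]
  rw [show (PySem.Set.empty : PySem.Set Int) = PySem.Set.ofList [] from rfl]
  rw [show (0 : Int) = (PySem.Set.ofList ([] : List Int)).sum from rfl]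
  rw [bLoop]
  congr 1
  have hlen : ((lista.length : Int) - i).toNat = (List.drop i.toNat lista).length := by
    simp [List.length_drop]; omega
  rw [PySem.List.pyRange_one, List.map_map, hlen]
  apply congrArg List.sum
  apply List.map_congr_left
  intro k hk
  simp only [Function.comp]
  rw [PySem.List.slice_toNat lista h0 (by omega)]
  have htk : (i + (k : Int) + 1).toNat - i.toNat = k + 1 := by omega
  rw [htk]
  simp

-- ===== VERDICT (by name: the statement is the Claim_ definition above) =====
theorem solve_spec : Claim_equal_solve := by
  intro lista _
  unfold Spec_solve solve solve_alt
  apply PySem.List.foldl_congr_mem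
  intro total i hi
  exact inner_eq lista i ((PySem.List.mem_pyRange_one.1 hi).1) total
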